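-- pv_equiv track=rewrite | github.com/codebatai/pauliterm | src/openfermion/utils/pauli_term_grouping.py | _terms_commute
-- ===== SOURCE A (Python) =====
-- from typing import List, Dict, Set, Tuple, Optional, Union, Any
--
-- def _terms_commute(term1: Tuple, term2: Tuple) -> bool:
--     """Check if two Pauli terms commute using quantum mechanics"""
--
--     if not term1 or not term2:  # Identity terms always commute
--         return True
--
--     # Convert to dictionaries for easier processing
--     dict1 = dict(term1)
--     dict2 = dict(term2)
--
--     # Count anti-commuting pairs
--     anti_commute_count = 0
--     all_qubits = set(dict1.keys()) | set(dict2.keys())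
--
--     # Pauli anti-commutation relations: {σᵢ, σⱼ} = 2δᵢⱼI
--     anti_commuting_pairs = {('X', 'Y'), ('Y', 'X'), ('Y', 'Z'),
--                            ('Z', 'Y'), ('X', 'Z'), ('Z', 'X')}
--
--     for qubit in all_qubits:
--         op1 = dict1.get(qubit, 'I')
--         op2 = dict2.get(qubit, 'I')
--
--         if (op1, op2) in anti_commuting_pairs:
--             anti_commute_count += 1
--
--     # Terms commute if even number of anti-commuting pairs
--     return anti_commute_count % 2 == 0
-- ===== SOURCE B (Python) =====
-- def _terms_commute(term1, term2):
--     """Check commutation by sorting each term's qubit->op map and doing a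
--     two-pointer merge of the two sorted lists, toggling a parity flag on
--     each anti-commuting collision (ops differ and both are X, Y or Z)."""
--     a = sorted(dict(term1).items(), key=lambda kv: kv[0])
--     b = sorted(dict(term2).items(), key=lambda kv: kv[0])
--     even = True
--     i = j = 0
--     while i < len(a) and j < len(b):
--         qa, oa = a[i]
--         qb, ob = b[j]
--         if qa < qb:
--             i += 1
--         elif qb < qa:
--             j += 1
--         else:
--             if oa != ob and oa in ('X', 'Y', 'Z') and ob in ('X', 'Y', 'Z'):
--                 even = not even
--             i += 1
--             j += 1
--     return even
-- ===== Notes on version B (the rewrite author's own statement) =====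
-- stated objective: alternative
-- what changed: Replaces the hash-dict union single pass with a six-pair anti-commutation table by sorting each term's qubit map and running a two-pointer merge over the two sorted Pauli strings, toggling a boolean parity flag on each collision where the operators differ and both are X/Y/Z; no empty-term guard is needed.
import Mathlib
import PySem

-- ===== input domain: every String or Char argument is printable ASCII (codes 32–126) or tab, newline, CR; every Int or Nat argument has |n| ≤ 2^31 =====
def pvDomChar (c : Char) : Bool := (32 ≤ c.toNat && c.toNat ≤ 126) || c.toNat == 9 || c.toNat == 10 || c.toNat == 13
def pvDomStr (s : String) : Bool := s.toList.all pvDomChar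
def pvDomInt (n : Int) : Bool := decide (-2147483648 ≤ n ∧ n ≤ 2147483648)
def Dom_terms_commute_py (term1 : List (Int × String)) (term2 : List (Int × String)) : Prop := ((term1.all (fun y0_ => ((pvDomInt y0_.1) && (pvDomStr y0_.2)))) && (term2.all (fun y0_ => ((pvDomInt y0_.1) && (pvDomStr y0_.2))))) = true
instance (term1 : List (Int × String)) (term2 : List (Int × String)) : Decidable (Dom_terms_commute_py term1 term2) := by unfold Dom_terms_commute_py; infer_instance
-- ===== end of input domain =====

-- B replaces A's hash-dict union pass with its six-pair table by sort-by-qubit plus a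
-- two-pointer merge of the two sorted Pauli strings toggling a parity flag (alternative).

-- ===== PORT A =====
def pvAntiPairs : PySem.Set (String × String) :=
  PySem.Set.ofList [("X","Y"),("Y","X"),("Y","Z"),("Z","Y"),("X","Z"),("Z","X")]

def terms_commute_py (term1 : List (Int × String)) (term2 : List (Int × String)) : Bool :=
  if term1 = [] ∨ term2 = [] then true
  else
    let dict1 : PySem.Dict Int String := PySem.Dict.ofList term1
    let dict2 : PySem.Dict Int String := PySem.Dict.ofList term2
    let all_qubits : PySem.Set Int :=
      PySem.Set.union (PySem.Set.ofList dict1.keys) (PySem.Set.ofList dict2.keys)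
    let cnt : Int := all_qubits.foldl (fun acc q =>
      if pvAntiPairs.contains (dict1.getD q "I", dict2.getD q "I") then acc + 1 else acc) 0
    PySem.Int.mod cnt 2 == 0

-- ===== PORT B =====
-- oa != ob and oa in ('X','Y','Z') and ob in ('X','Y','Z')
def pvAnti (oa ob : String) : Bool :=
  (oa ≠ ob : Bool) && (oa == "X" || oa == "Y" || oa == "Z") && (ob == "X" || ob == "Y" || ob == "Z")

-- the while loop over indices i, j: recursion on the two remaining suffixes
def pvMerge : List (Int × String) → List (Int × String) → Bool → Bool
  | [], _, even => even
  | _ :: _, [], even => even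
  | (qa, oa) :: as_, (qb, ob) :: bs, even =>
    if qa < qb then pvMerge as_ ((qb, ob) :: bs) even
    else if qb < qa then pvMerge ((qa, oa) :: as_) bs even
    else pvMerge as_ bs (if pvAnti oa ob then !even else even)

def terms_commute_py_alt (term1 : List (Int × String)) (term2 : List (Int × String)) : Bool :=
  let a := PySem.List.sorted (PySem.Dict.ofList term1).items (fun kv => kv.1) false
  let b := PySem.List.sorted (PySem.Dict.ofList term2).items (fun kv => kv.1) false
  pvMerge a b true

-- ===== PRECONDITION & SPEC =====
def Spec_terms_commute_py (term1 : List (Int × String)) (term2 : List (Int × String)) (out : Bool) : Prop := out = terms_commute_py_alt term1 term2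
instance (term1 : List (Int × String)) (term2 : List (Int × String)) (out : Bool) : Decidable (Spec_terms_commute_py term1 term2 out) := by unfold Spec_terms_commute_py; infer_instance

-- ===== CLAIM (what is proved, stated in full; the proofs are below) =====
def Claim_equal_terms_commute_py : Prop := ∀ (term1 : List (Int × String)) (term2 : List (Int × String)), Dom_terms_commute_py term1 term2 → Spec_terms_commute_py term1 term2 (terms_commute_py term1 term2)

-- ===== LEMMAS AND PROOFS =====

-- first-match lookup of a qubit in a remaining suffix of the merge
def pvLookup (b : List (Int × String)) (q : Int) : Option String :=
  (b.find? (fun r => r.1 == q)).map (·.2)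

theorem pvLookup_nil (q : Int) : pvLookup [] q = none := rfl

theorem pvLookup_cons (qb : Int) (ob : String) (bs : List (Int × String)) (q : Int) :
    pvLookup ((qb, ob) :: bs) q = if qb = q then some ob else pvLookup bs q := by
  simp only [pvLookup, List.find?_cons]
  by_cases h : qb = q
  · simp [h]
  · have hb : (qb == q) = false := by simp [h]
    rw [hb]
    simp [h]

theorem pvLookup_none_of_forall_lt (b : List (Int × String)) (q : Int)
    (h : ∀ r ∈ b, q < r.1) : pvLookup b q = none := by
  simp only [pvLookup, Option.map_eq_none_iff, List.find?_eq_none]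
  intro r hr
  have := h r hr
  simp; omega

-- the merge, on key-strictly-increasing lists, is a toggle fold over the first list
theorem pvMerge_spec (a b : List (Int × String)) (even : Bool)
    (ha : a.Pairwise (fun p r => p.1 < r.1)) (hb : b.Pairwise (fun p r => p.1 < r.1)) :
    pvMerge a b even = a.foldl
      (fun e p => if (match pvLookup b p.1 with
                      | some t => pvAnti p.2 t
                      | none => false) then !e else e) even := by
  revert ha hb
  induction a, b, even using pvMerge.induct with
  | case1 b even => intro _ _; simp [pvMerge]
  | case2 p as_ even =>
      intro _ _
      simp [pvMerge, pvLookup_nil]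
  | case3 qa oa as_ qb ob bs even hlt ih =>
      intro ha hb
      have hnone : pvLookup ((qb, ob) :: bs) qa = none := by
        rw [pvLookup_cons, if_neg (by omega)]
        exact pvLookup_none_of_forall_lt bs qa
          (fun r hr => lt_trans hlt ((List.pairwise_cons.1 hb).1 r hr))
      rw [List.foldl_cons]
      simp only [hnone]
      rw [show pvMerge ((qa, oa) :: as_) ((qb, ob) :: bs) even
            = pvMerge as_ ((qb, ob) :: bs) even by simp [pvMerge, hlt]]
      exact ih (List.pairwise_cons.1 ha).2 hb
  | case4 qa oa as_ qb ob bs even hnlt hlt ih =>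
      intro ha hb
      rw [show pvMerge ((qa, oa) :: as_) ((qb, ob) :: bs) even
            = pvMerge ((qa, oa) :: as_) bs even by simp [pvMerge, hnlt, hlt]]
      rw [ih ha (List.pairwise_cons.1 hb).2]
      apply PySem.List.foldl_congr_mem'
      intro p hp acc
      have hgt : qb < p.1 := by
        rcases List.mem_cons.1 hp with h | h
        · subst h; exact hlt
        · exact lt_trans hlt ((List.pairwise_cons.1 ha).1 p h)
      rw [pvLookup_cons, if_neg (show ¬ qb = p.1 by omega)]
  | case5 qa oa as_ qb ob bs even hnlt hnlt' ih =>
      intro ha hb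
      have heq : qa = qb := by omega
      have hsome : pvLookup ((qb, ob) :: bs) qa = some ob := by
        rw [pvLookup_cons, if_pos heq.symm]
      rw [show pvMerge ((qa, oa) :: as_) ((qb, ob) :: bs) even
            = pvMerge as_ bs (if pvAnti oa ob then !even else even) by
          simp [pvMerge, hnlt, hnlt']]
      rw [List.foldl_cons]
      simp only [hsome]
      simp only [dite_eq_ite] at ih
      rw [ih (List.pairwise_cons.1 ha).2 (List.pairwise_cons.1 hb).2]
      apply PySem.List.foldl_congr_mem'
      intro p hp acc
      have hgt : qb < p.1 := heq ▸ (List.pairwise_cons.1 ha).1 p hp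
      rw [pvLookup_cons, if_neg (show ¬ qb = p.1 by omega)]

-- a toggle fold is the parity of a count
theorem pvFold_toggle (l : List (Int × String)) (pr : Int × String → Bool) (even : Bool) :
    l.foldl (fun e p => if pr p then !e else e) even
      = (even != decide (l.countP pr % 2 = 1)) := by
  induction l generalizing even with
  | nil => simp
  | cons p t ih =>
      rw [List.foldl_cons, ih, List.countP_cons]
      by_cases h : pr p = true <;> cases even <;>
        simp [h, Nat.add_mod] <;> rcases Nat.mod_two_eq_zero_or_one (t.countP pr) with h2 | h2 <;> simp [h2]

-- the six-pair table is exactly the pvAnti predicate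
theorem pvContains_eq_anti (s t : String) : pvAntiPairs.contains (s, t) = pvAnti s t := by
  by_cases h1 : s = "X" <;> by_cases h2 : s = "Z" <;> by_cases h3 : s = "Y" <;>
    by_cases h4 : t = "X" <;> by_cases h5 : t = "Z" <;> by_cases h6 : t = "Y" <;>
      simp_all [pvAntiPairs, pvAnti, PySem.Set.contains, Prod.ext_iff]

theorem pvAnti_I_right (s : String) : pvAnti s "I" = false := by
  simp [pvAnti]

theorem pvAnti_I_left (t : String) : pvAnti "I" t = false := by
  simp [pvAnti]

theorem pvMerge_nil_right (a : List (Int × String)) (even : Bool) :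
    pvMerge a [] even = even := by
  cases a with
  | nil => simp [pvMerge]
  | cons p as_ =>
      obtain ⟨q, o⟩ := p
      simp [pvMerge]

theorem pvLookup_eq_some_of_mem (b : List (Int × String)) (q : Int) (v : String)
    (hnd : (b.map (·.1)).Nodup) (hm : (q, v) ∈ b) : pvLookup b q = some v := by
  induction b with
  | nil => cases hm
  | cons r bs ih =>
      obtain ⟨qr, vr⟩ := r
      simp only [List.map_cons, List.nodup_cons] at hnd
      rw [pvLookup_cons]
      rcases List.mem_cons.1 hm with h | h
      · cases h
        simp
      · have hne : qr ≠ q := fun he =>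
          hnd.1 (he ▸ (List.mem_map.2 ⟨(q, v), h, rfl⟩))
        rw [if_neg hne]
        exact ih hnd.2 h

theorem pvLookup_eq_none_of_forall_ne (b : List (Int × String)) (q : Int)
    (h : ∀ r ∈ b, r.1 ≠ q) : pvLookup b q = none := by
  simp only [pvLookup, Option.map_eq_none_iff, List.find?_eq_none]
  intro r hr
  simpa using h r hr

theorem pvPairwise_strict (l : List (Int × String))
    (hle : l.Pairwise (fun p r => p.1 ≤ r.1)) (hnd : (l.map (·.1)).Nodup) :
    l.Pairwise (fun p r => p.1 < r.1) := by
  have hne : l.Pairwise (fun p r => p.1 ≠ r.1) := List.pairwise_map.1 hnd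
  exact (hle.and hne).imp (fun h => lt_of_le_of_ne h.1 h.2)

-- ===== VERDICT (by name: the statement is the Claim_ definition above) =====
theorem terms_commute_py_spec : Claim_equal_terms_commute_py := by
  intro term1 term2 _
  unfold Spec_terms_commute_py
  by_cases h1 : term1 = []
  · subst h1
    have hA : terms_commute_py [] term2 = true := by
      unfold terms_commute_py
      rw [if_pos (Or.inl rfl)]
    have hB : terms_commute_py_alt [] term2 = true := by
      unfold terms_commute_py_alt
      rw [show PySem.List.sorted (PySem.Dict.ofList ([] : List (Int × String))).items
            (fun kv => kv.1) false = [] from rfl]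
      simp [pvMerge]
    rw [hA, hB]
  by_cases h2 : term2 = []
  · subst h2
    have hA : terms_commute_py term1 [] = true := by
      unfold terms_commute_py
      rw [if_pos (Or.inr rfl)]
    have hB : terms_commute_py_alt term1 [] = true := by
      unfold terms_commute_py_alt
      rw [show PySem.List.sorted (PySem.Dict.ofList ([] : List (Int × String))).items
            (fun kv => kv.1) false = [] from rfl]
      rw [pvMerge_nil_right]
    rw [hA, hB]
  simp only [terms_commute_py, terms_commute_py_alt]
  rw [if_neg (by tauto)]
  have hnd1 := PySem.Dict.nodup_keys_ofList term1
  have hnd2 := PySem.Dict.nodup_keys_ofList term2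
  have hk1 : (PySem.Dict.ofList term1).keys = (PySem.Dict.ofList term1).items.map (·.1) := rfl
  have hk2 : (PySem.Dict.ofList term2).keys = (PySem.Dict.ofList term2).items.map (·.1) := rfl
  -- B side: the merge is the parity of a count over term1's items
  have hpa : ((PySem.List.sorted (PySem.Dict.ofList term1).items (fun kv => kv.1) false).map
      (fun p : Int × String => p.1)).Nodup := by
    have hp := (PySem.List.sorted_perm (PySem.Dict.ofList term1).items
      (fun kv => kv.1) false).map (fun p : Int × String => p.1)
    exact hp.nodup_iff.2 (hk1 ▸ hnd1)
  have hpb : ((PySem.List.sorted (PySem.Dict.ofList term2).items (fun kv => kv.1) false).map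
      (fun p : Int × String => p.1)).Nodup := by
    have hp := (PySem.List.sorted_perm (PySem.Dict.ofList term2).items
      (fun kv => kv.1) false).map (fun p : Int × String => p.1)
    exact hp.nodup_iff.2 (hk2 ▸ hnd2)
  have hsa := pvPairwise_strict _ (PySem.List.sorted_pairwise (PySem.Dict.ofList term1).items (fun kv => kv.1)) hpa
  have hsb := pvPairwise_strict _ (PySem.List.sorted_pairwise (PySem.Dict.ofList term2).items (fun kv => kv.1)) hpb
  rw [pvMerge_spec _ _ true hsa hsb, pvFold_toggle]
  -- the lookup in the sorted term2 list is the dict lookup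
  have hbridge : ∀ p ∈ (PySem.Dict.ofList term1).items,
      (match pvLookup (PySem.List.sorted (PySem.Dict.ofList term2).items (fun kv => kv.1) false) p.1 with
        | some t => pvAnti p.2 t
        | none => false)
        = pvAnti p.2 ((PySem.Dict.ofList term2).getD p.1 "I") := by
    intro p _
    cases hq : (PySem.Dict.ofList term2).get? p.1 with
    | some v =>
        have hmem : (p.1, v) ∈ PySem.List.sorted (PySem.Dict.ofList term2).items (fun kv => kv.1) false :=
          (PySem.List.mem_sorted _ _ _ _).2 (PySem.Dict.mem_items_of_get?_eq_some _ hq)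
        rw [pvLookup_eq_some_of_mem _ _ _ hpb hmem, PySem.Dict.getD_of_get?_eq_some _ _ hq]
    | none =>
        have hnone : pvLookup (PySem.List.sorted (PySem.Dict.ofList term2).items (fun kv => kv.1) false) p.1 = none := by
          apply pvLookup_eq_none_of_forall_ne
          intro r hr he
          have hrk : r.1 ∈ (PySem.Dict.ofList term2).keys := by
            rw [hk2]
            exact List.mem_map_of_mem ((PySem.List.mem_sorted _ _ _ _).1 hr)
          exact (PySem.Dict.get?_eq_none_iff_not_mem_keys _ _).1 hq (he ▸ hrk)
        rw [hnone, PySem.Dict.getD_of_get?_eq_none _ _ hq, pvAnti_I_right]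
  have hcntB : (PySem.List.sorted (PySem.Dict.ofList term1).items (fun kv => kv.1) false).countP
        (fun p => (match pvLookup (PySem.List.sorted (PySem.Dict.ofList term2).items (fun kv => kv.1) false) p.1 with
          | some t => pvAnti p.2 t | none => false))
      = (PySem.Dict.ofList term1).items.countP
        (fun p => pvAnti p.2 ((PySem.Dict.ofList term2).getD p.1 "I")) := by
    rw [(PySem.List.sorted_perm _ _ _).countP_eq]
    exact List.countP_congr (fun x hx => by rw [hbridge x hx])
  -- A side: the union-set count is the same count over term1's items
  rw [PySem.List.foldl_if_add_one]
  have hU : PySem.Set.union (PySem.Set.ofList (PySem.Dict.ofList term1).keys)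
        (PySem.Set.ofList (PySem.Dict.ofList term2).keys)
      = (PySem.Dict.ofList term1).keys
        ++ ((PySem.Set.ofList (PySem.Dict.ofList term2).keys).filter
              (fun y => !(PySem.Set.contains (PySem.Dict.ofList term1).keys y))) := by
    rw [show PySem.Set.union (PySem.Set.ofList (PySem.Dict.ofList term1).keys)
          (PySem.Set.ofList (PySem.Dict.ofList term2).keys)
        = PySem.Set.update (PySem.Set.ofList (PySem.Dict.ofList term1).keys)
          (PySem.Set.ofList (PySem.Dict.ofList term2).keys) from rfl]
    rw [PySem.Set.ofList_eq_self_of_nodup _ hnd1, PySem.Set.update_eq_append_filter,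
        PySem.Set.ofList_ofList]
  rw [hU, List.countP_append]
  have hzero : ((PySem.Set.ofList (PySem.Dict.ofList term2).keys).filter
        (fun y => !(PySem.Set.contains (PySem.Dict.ofList term1).keys y))).countP
        (fun q => pvAntiPairs.contains ((PySem.Dict.ofList term1).getD q "I",
          (PySem.Dict.ofList term2).getD q "I")) = 0 := by
    rw [List.countP_eq_zero]
    intro y hy
    have hnc : PySem.Set.contains (PySem.Dict.ofList term1).keys y = false := by
      have := (List.mem_filter.1 hy).2
      simpa using this
    have hnotmem : y ∉ (PySem.Dict.ofList term1).keys :=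
      fun hmem => by rw [(PySem.Set.contains_iff _ _).2 hmem] at hnc; cases hnc
    have hdc : (PySem.Dict.ofList term1).contains y = false := by
      rw [PySem.Dict.contains_eq_decide_mem_keys]
      simpa using hnotmem
    rw [PySem.Dict.getD_of_not_contains _ _ hdc, pvContains_eq_anti, pvAnti_I_left]
    simp
  rw [hzero, Nat.add_zero]
  have hcntA : (PySem.Dict.ofList term1).keys.countP
        (fun q => pvAntiPairs.contains ((PySem.Dict.ofList term1).getD q "I",
          (PySem.Dict.ofList term2).getD q "I"))
      = (PySem.Dict.ofList term1).items.countP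
        (fun p => pvAnti p.2 ((PySem.Dict.ofList term2).getD p.1 "I")) := by
    rw [hk1, List.countP_map]
    apply List.countP_congr
    intro p hp
    simp only [Function.comp]
    rw [PySem.Dict.getD_of_mem_items _ hp hnd1 "I", pvContains_eq_anti]
  rw [hcntA, hcntB]
  -- both sides are "the count is even"
  set n := (PySem.Dict.ofList term1).items.countP
      (fun p => pvAnti p.2 ((PySem.Dict.ofList term2).getD p.1 "I")) with hn
  have hm : PySem.Int.mod (0 + (n : Int)) 2 = ((n % 2 : Nat) : Int) := by
    rw [PySem.Int.mod_eq_emod_of_pos (by norm_num)]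
    omega
  rw [hm]
  rcases Nat.mod_two_eq_zero_or_one n with h | h <;> simp [h]
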